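-- pv_equiv track=rewrite | github.com/ARYANB1329/ENGINEERING-WORK-AND-ASSIGNMENTS | CSD 17TH 5.py | solve
-- ===== SOURCE A (Python) =====
-- def solve(s):
--     stack = []
--
--     def delete_earliest_consecutive_duplicate_characters():
--         while len(stack) > 1 and stack[-1] == stack[-2]:
--             end = stack[-1]
--             while stack and stack[-1] == end:
--                 stack.pop()
--
--     for c in s:
--         if stack and stack[-1] != c:
--             delete_earliest_consecutive_duplicate_characters()
--         stack.append(c)
--
--     delete_earliest_consecutive_duplicate_characters()
--
--     return "".join(stack)
-- ===== SOURCE B (Python) =====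
-- def solve(s):
--     # Fixpoint of "delete the leftmost maximal run of >=2 equal adjacent chars":
--     # rescan from the start after each splice until no adjacent duplicates remain.
--     while True:
--         i = next((k for k, (x, y) in enumerate(zip(s, s[1:])) if x == y), None)
--         if i is None:
--             return s
--         j = i + 2
--         while j < len(s) and s[j] == s[i]:
--             j += 1
--         s = s[:i] + s[j:]
-- ===== Notes on version B (the rewrite author's own statement) =====
-- stated objective: simpler
-- what changed: Dropped A's stack and its nested cascading pop-loop entirely: B repeatedly scans the string for the leftmost adjacent-duplicate run, splices it out, and rescans from the start until no adjacent duplicates remain (a fixpoint of one rewrite step instead of a single-pass stack with cascades).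
import Mathlib
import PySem

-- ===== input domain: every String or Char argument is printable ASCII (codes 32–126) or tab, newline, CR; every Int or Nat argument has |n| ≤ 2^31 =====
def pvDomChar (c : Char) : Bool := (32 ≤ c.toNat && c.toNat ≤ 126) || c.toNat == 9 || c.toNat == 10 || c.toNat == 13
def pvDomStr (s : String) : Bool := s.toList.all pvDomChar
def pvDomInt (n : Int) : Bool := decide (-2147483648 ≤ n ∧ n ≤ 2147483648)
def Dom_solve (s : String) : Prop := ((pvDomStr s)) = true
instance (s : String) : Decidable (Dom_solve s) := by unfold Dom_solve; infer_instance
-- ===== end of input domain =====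

-- B drops A's stack and cascading pop-loop: it repeatedly splices out the leftmost
-- adjacent-duplicate run and rescans until a fixpoint; objective: simpler (no stack,
-- no nested cascade), not faster.

-- ===== PORT A =====
-- The stack is a List Char with the TOP at the HEAD (Python's stack[-1] = head).

-- inner 'while stack and stack[-1] == end: stack.pop()'
def popRun (e : Char) : List Char → List Char
  | [] => []
  | x :: xs => if x = e then popRun e xs else x :: xs

theorem popRun_length_le (e : Char) : ∀ l : List Char, (popRun e l).length ≤ l.length
  | [] => le_refl _
  | x :: xs => by
    simp only [popRun]
    split
    · exact le_trans (popRun_length_le e xs) (Nat.le_succ _)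
    · exact le_refl _

-- outer 'while len(stack) > 1 and stack[-1] == stack[-2]: …'
def delete : List Char → List Char
  | [] => []
  | [x] => [x]
  | a :: b :: rest =>
    if a = b then delete (popRun a (b :: rest)) else a :: b :: rest
termination_by l => l.length
decreasing_by
  have := popRun_length_le a (b :: rest)
  simp only [List.length_cons] at *
  omega

-- body of 'for c in s: if stack and stack[-1] != c: delete(); stack.append(c)'
def stepA (st : List Char) (c : Char) : List Char :=
  match st with
  | [] => c :: st
  | t :: _ => if t ≠ c then c :: delete st else c :: st

def loopA (st : List Char) : List Char → List Char
  | [] => st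
  | c :: cs => loopA (stepA st c) cs

def solve (s : String) : String :=
  String.ofList (delete (loopA [] s.toList)).reverse

-- ===== PORT B =====
-- 'find the leftmost k with s[k] == s[k+1], then skip the whole run': the index scan
-- becomes the obvious structural recursion over the suffix; returns none when the
-- string has no adjacent duplicate pair, else the string with the run spliced out.
def findRemove : List Char → Option (List Char)
  | a :: b :: rest =>
    if a = b then some (rest.dropWhile (· == a))
    else (findRemove (b :: rest)).map (a :: ·)
  | _ => none

theorem findRemove_length : ∀ {l l' : List Char}, findRemove l = some l' → l'.length < l.length
  | a :: b :: rest, l', h => by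
    simp only [findRemove] at h
    split at h
    · cases h
      have := rest.length_dropWhile_le (· == a)
      simp only [List.length_cons]
      omega
    · cases hm : findRemove (b :: rest) with
      | none => rw [hm] at h; cases h
      | some m =>
        rw [hm] at h
        cases h
        have := findRemove_length hm
        simp only [List.length_cons] at *
        omega

-- 'while True: … s = s[:i] + s[j:]'
def solveB (l : List Char) : List Char :=
  match h : findRemove l with
  | none => l
  | some l' => solveB l'
termination_by l.length
decreasing_by exact findRemove_length h

def solve_alt (s : String) : String := String.ofList (solveB s.toList)

-- ===== PRECONDITION & SPEC =====
def Spec_solve (s : String) (out : String) : Prop := out = solve_alt s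
instance (s : String) (out : String) : Decidable (Spec_solve s out) := by unfold Spec_solve; infer_instance

-- ===== CLAIM (what is proved, stated in full; the proofs are below) =====
def Claim_equal_solve : Prop := ∀ (s : String), Dom_solve s → Spec_solve s (solve s)

-- ===== LEMMAS AND PROOFS =====

theorem chainNe_rev {l : List Char} (h : List.IsChain (· ≠ ·) l) :
    List.IsChain (· ≠ ·) l.reverse := by
  rw [List.isChain_reverse]
  exact h.imp fun a b hab => hab.symm

theorem rep_shift {c : Char} : ∀ (m : ℕ) (X : List Char),
    List.replicate m c ++ (c :: X) = c :: (List.replicate m c ++ X)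
  | 0, X => rfl
  | m + 1, X => by rw [List.replicate_succ]; simp [rep_shift m X]

-- A's cascade is a no-op on a stack without adjacent duplicates
theorem delete_nodup : ∀ {st : List Char}, List.IsChain (· ≠ ·) st → delete st = st
  | [], _ => by rw [delete]
  | [_], _ => by rw [delete]
  | a :: b :: rest, h => by
    rw [delete, if_neg (List.rel_of_isChain_cons_cons h)]

theorem stepA_nodup {st : List Char} (h : List.IsChain (· ≠ ·) st) (c : Char) :
    stepA st c = c :: st := by
  cases st with
  | nil => rfl
  | cons t w =>
    rw [stepA]
    split
    · rw [delete_nodup h]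
    · rfl

theorem solveB_none {l : List Char} (h : findRemove l = none) : solveB l = l := by
  rw [solveB.eq_def, h]

theorem solveB_some {l l' : List Char} (h : findRemove l = some l') :
    solveB l = solveB l' := by
  rw [solveB.eq_def, h]

theorem loopA_append (xs ys : List Char) : ∀ st, loopA st (xs ++ ys) = loopA (loopA st xs) ys := by
  induction xs with
  | nil => intro st; rfl
  | cons c cs ih => intro st; simp only [List.cons_append, loopA, ih]

-- processing a duplicate-free string just pushes it
theorem loopA_nodup : ∀ (u : List Char) (st : List Char),
    List.IsChain (· ≠ ·) (u.reverse ++ st) → loopA st u = u.reverse ++ st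
  | [], st, _ => by simp [loopA]
  | c :: u', st, h => by
    have hre : (c :: u').reverse ++ st = u'.reverse ++ (c :: st) := by simp
    rw [hre] at h ⊢
    have hst : List.IsChain (· ≠ ·) st := h.right_of_append.tail
    rw [loopA, stepA_nodup hst c]
    exact loopA_nodup u' (c :: st) h

-- pushing a run onto a stack already topped by the same char
theorem loopA_run (c : Char) : ∀ (m : ℕ) (w : List Char),
    loopA (c :: w) (List.replicate m c) = List.replicate m c ++ (c :: w)
  | 0, w => rfl
  | m + 1, w => by
    rw [List.replicate_succ, loopA]
    have hs : stepA (c :: w) c = c :: c :: w := by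
      rw [stepA, if_neg (by simp)]
    rw [hs, loopA_run c m (c :: w), rep_shift]
    rfl

theorem popRun_not_head (e : Char) (l : List Char)
    (h : ∀ t, l ≠ e :: t) : popRun e l = l := by
  cases l with
  | nil => rfl
  | cons x xs =>
    rw [popRun, if_neg]
    intro hx
    subst hx
    exact h xs rfl

theorem popRun_replicate (e : Char) (n : ℕ) (l : List Char)
    (h : ∀ t, l ≠ e :: t) : popRun e (List.replicate n e ++ l) = l := by
  induction n with
  | zero => simpa using popRun_not_head e l h
  | succ m ih => simp [List.replicate_succ, popRun, ih]

-- the cascade swallows a run of length ≥ 2 sitting on top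
theorem delete_run {c : Char} {k : ℕ} {w : List Char} (hk : 2 ≤ k)
    (hw : ∀ t, w ≠ c :: t) :
    delete (List.replicate k c ++ w) = delete w := by
  obtain ⟨m, rfl⟩ : ∃ m, k = m + 2 := ⟨k - 2, by omega⟩
  have h1 : List.replicate (m + 2) c ++ w
      = c :: c :: (List.replicate m c ++ w) := by
    simp [List.replicate_succ]
  rw [h1, delete, if_pos rfl]
  have h2 : popRun c (c :: (List.replicate m c ++ w)) = w := by
    have := popRun_replicate c (m + 1) w hw
    simpa [List.replicate_succ] using this
  rw [h2]

-- IsChain Ne (u ++ [c]) means u does not end in c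
theorem rev_ne_cons {u : List Char} {c : Char}
    (h : List.IsChain (· ≠ ·) (u ++ [c])) : ∀ t, u.reverse ≠ c :: t := by
  intro t ht
  have hu : u = t.reverse ++ [c] := by
    have := congrArg List.reverse ht
    simpa using this
  subst hu
  rcases List.isChain_append.mp h with ⟨_, _, hrel⟩
  exact hrel c (by simp) c (by simp) rfl

-- KEY: removing the leftmost maximal duplicate run does not change A's result
theorem stepA_invariant {u v : List Char} {c : Char} {k : ℕ}
    (hk : 2 ≤ k) (hchain : List.IsChain (· ≠ ·) (u ++ [c]))
    (hv : ∀ t, v ≠ c :: t) :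
    delete (loopA [] (u ++ List.replicate k c ++ v)) = delete (loopA [] (u ++ v)) := by
  have hu : List.IsChain (· ≠ ·) u := hchain.left_of_append
  have hur : List.IsChain (· ≠ ·) u.reverse := chainNe_rev hu
  have hne : ∀ t, u.reverse ≠ c :: t := rev_ne_cons hchain
  have hloopu : loopA [] u = u.reverse := by
    have := loopA_nodup u [] (by simpa using hur)
    simpa using this
  obtain ⟨m, rfl⟩ : ∃ m, k = m + 2 := ⟨k - 2, by omega⟩
  -- stack after u ++ replicate k c
  have hrun : loopA u.reverse (List.replicate (m + 2) c)
      = List.replicate (m + 2) c ++ u.reverse := by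
    rw [List.replicate_succ, loopA, stepA_nodup hur c, loopA_run, rep_shift]
    rfl
  have hL : loopA [] (u ++ List.replicate (m + 2) c ++ v)
      = loopA (List.replicate (m + 2) c ++ u.reverse) v := by
    rw [List.append_assoc, loopA_append, hloopu, loopA_append, hrun]
  have hR : loopA [] (u ++ v) = loopA u.reverse v := by
    rw [loopA_append, hloopu]
  rw [hL, hR]
  cases v with
  | nil =>
    simp only [loopA]
    rw [delete_run hk hne, delete_nodup hur]
  | cons d v' =>
    have hdc : c ≠ d := by
      intro hcd
      exact hv v' (by rw [hcd])
    have hstepL : stepA (List.replicate (m + 2) c ++ u.reverse) d = d :: u.reverse := by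
      have h1 : List.replicate (m + 2) c ++ u.reverse
          = c :: (List.replicate (m + 1) c ++ u.reverse) := rfl
      rw [h1, stepA, if_pos hdc, ← h1, delete_run hk hne, delete_nodup hur]
    rw [loopA, loopA, hstepL, stepA_nodup hur d]

-- if B finds nothing to remove, the string has no adjacent duplicates
theorem findRemove_none : ∀ {l : List Char}, findRemove l = none →
    List.IsChain (· ≠ ·) l
  | [], _ => List.isChain_nil
  | [_], _ => List.isChain_singleton _
  | a :: b :: rest, h => by
    simp only [findRemove] at h
    split at h
    · cases h
    · cases hm : findRemove (b :: rest) with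
      | none =>
        rename_i hab
        exact List.isChain_cons_cons.mpr ⟨hab, findRemove_none hm⟩
      | some m => rw [hm] at h; cases h

theorem dropWhile_ne_cons (a : Char) : ∀ (l t : List Char), l.dropWhile (· == a) ≠ a :: t := by
  intro l
  induction l with
  | nil => intro t h; cases h
  | cons x xs ih =>
    intro t h
    rw [List.dropWhile_cons] at h
    split at h
    · exact ih t h
    · rename_i hx
      rw [List.cons_eq_cons] at h
      exact hx (by simp [h.1])

-- what B removes is the leftmost maximal run of length ≥ 2
theorem findRemove_decomp : ∀ {l l' : List Char}, findRemove l = some l' →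
    ∃ u c k v, l = u ++ List.replicate k c ++ v ∧ l' = u ++ v ∧ 2 ≤ k ∧
      List.IsChain (· ≠ ·) (u ++ [c]) ∧ ∀ t, v ≠ c :: t
  | a :: b :: rest, l', h => by
    simp only [findRemove] at h
    split at h
    · rename_i hab
      subst hab
      cases h
      obtain ⟨n, htw⟩ : ∃ n, rest.takeWhile (· == a) = List.replicate n a :=
        ⟨(rest.takeWhile (· == a)).length, by
          rw [List.eq_replicate_iff]
          exact ⟨rfl, fun b hb => by simpa using List.mem_takeWhile_imp hb⟩⟩
      refine ⟨[], a, 2 + n, rest.dropWhile (· == a),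
        ?_, rfl, by omega, List.isChain_singleton a, dropWhile_ne_cons a rest⟩
      have hsplit : rest = rest.takeWhile (· == a) ++ rest.dropWhile (· == a) :=
        (List.takeWhile_append_dropWhile).symm
      calc a :: a :: rest
          = a :: a :: (rest.takeWhile (· == a) ++ rest.dropWhile (· == a)) := by
            rw [← hsplit]
        _ = [] ++ List.replicate (2 + n) a ++ rest.dropWhile (· == a) := by
            rw [htw, show List.replicate (2 + n) a
              = a :: a :: List.replicate n a from by rw [Nat.add_comm]; rfl]
            simp
    · cases hm : findRemove (b :: rest) with
      | none => rw [hm] at h; cases h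
      | some m =>
        rw [hm] at h
        cases h
        rename_i hab
        obtain ⟨u, c, k, v, hl, hm', hk, hch, hv⟩ := findRemove_decomp hm
        refine ⟨a :: u, c, k, v, by simp [hl], by simp [hm'], hk, ?_, hv⟩
        rw [List.cons_append, List.isChain_cons]
        refine ⟨?_, hch⟩
        intro y hy
        cases u with
        | nil =>
          simp at hy
          subst hy
          have : b = c := by
            have hb : b :: rest = List.replicate k c ++ v := by simpa using hl
            obtain ⟨m2, rfl⟩ : ∃ m2, k = m2 + 1 := ⟨k - 1, by omega⟩
            rw [List.replicate_succ] at hb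
            exact (List.cons_eq_cons.mp hb).1
          rw [← this]; exact hab
        | cons x xs =>
          simp at hy
          subst hy
          have : b = x := by
            have hb : b :: rest = x :: (xs ++ List.replicate k c ++ v) := by
              simpa using hl
            exact (List.cons_eq_cons.mp hb).1
          rw [← this]; exact hab

theorem solveA_step {l l' : List Char} (h : findRemove l = some l') :
    delete (loopA [] l) = delete (loopA [] l') := by
  obtain ⟨u, c, k, v, rfl, rfl, hk, hch, hv⟩ := findRemove_decomp h
  exact stepA_invariant hk hch hv

theorem main_list : ∀ (l : List Char), delete (loopA [] l) = (solveB l).reverse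
  | l => by
    cases h : findRemove l with
    | none =>
      have hc : List.IsChain (· ≠ ·) l := findRemove_none h
      have : loopA [] l = l.reverse := by
        have := loopA_nodup l [] (by simpa using chainNe_rev hc)
        simpa using this
      rw [solveB_none h, this, delete_nodup (chainNe_rev hc)]
    | some l' =>
      rw [solveA_step h, solveB_some h]
      exact main_list l'
termination_by l => l.length
decreasing_by exact findRemove_length h

-- ===== VERDICT (by name: the statement is the Claim_ definition above) =====
theorem solve_spec : Claim_equal_solve := by
  intro s _
  unfold Spec_solve solve solve_alt
  rw [main_list, List.reverse_reverse]
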